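-- pv_equiv track=rewrite | github.com/WildMaks456/PythonLessonVT-24-3s | var2.py | sum_unique_digits
-- ===== SOURCE A (Python) =====
-- def sum_unique_digits(s, used = None, i=0):
-- 	if used is None:
-- 		used = set()
-- 	if i == len(s):
--      		return sum(int(x) for x in used)
-- 	if s[i].isdigit():
-- 		used.add(s[i])
-- 	return sum_unique_digits(s, used, i+1)
-- ===== SOURCE B (Python) =====
-- def sum_unique_digits(s, used=None, i=0):
--     if used is None:
--         used = set()
--     for j in range(i, len(s)):
--         c = s[j]
--         if c.isdigit():
--             used.add(c)
--     return sum(int(x) for x in used)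
-- ===== Notes on version B (the rewrite author's own statement) =====
-- stated objective: simpler
-- what changed: Replaced A's tail recursion (one Python call frame per character, with the set threaded through the recursive self-call) by a single explicit index loop over range(i, len(s)) feeding the same set, then one sum.
import Mathlib
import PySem

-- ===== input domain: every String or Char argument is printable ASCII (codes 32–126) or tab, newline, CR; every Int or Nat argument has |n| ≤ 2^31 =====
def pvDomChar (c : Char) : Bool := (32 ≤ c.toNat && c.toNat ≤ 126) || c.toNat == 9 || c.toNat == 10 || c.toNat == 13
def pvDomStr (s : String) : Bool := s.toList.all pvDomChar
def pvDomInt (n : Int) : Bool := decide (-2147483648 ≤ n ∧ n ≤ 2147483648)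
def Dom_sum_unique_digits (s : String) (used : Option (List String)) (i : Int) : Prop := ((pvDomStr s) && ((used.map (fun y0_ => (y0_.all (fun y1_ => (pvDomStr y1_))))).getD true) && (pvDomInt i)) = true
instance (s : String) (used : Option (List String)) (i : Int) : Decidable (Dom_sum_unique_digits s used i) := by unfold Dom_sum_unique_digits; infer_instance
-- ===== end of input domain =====

-- B replaces A's tail recursion by one explicit index loop (same digit-set, same sum);
-- return-value equivalence only: both Pythons mutate a passed-in `used` set identically.

-- ===== PORT A =====
-- sum(int(x) for x in used): a Python set's iteration order is not modelled, but an Int sum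
-- is order-independent, so summing the Set's element list is exact.
def pvSumIntsA : List String → Int
  | [] => 0
  | x :: xs => (PySem.Int.ofStr? x).getD 0 + pvSumIntsA xs
  -- (PySem.Int.ofStr? x).getD 0 = int(x); `none` is Python's ValueError, excluded by Pre_

def pvRecA (cs : List Char) (used : PySem.Set String) (i : Int) : Int :=
  if i = (cs.length : Int) then
    pvSumIntsA used
  else
    match h : PySem.List.pyGet? cs i with
    | none => 0  -- s[i] raises IndexError here; excluded by Pre_
    | some c =>
      pvRecA cs (if PySem.Chars.isdigit c then PySem.Set.add used (String.singleton c) else used) (i + 1)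
termination_by ((cs.length : Int) - i).toNat
decreasing_by
  have hin : PySem.Raise.InRange cs.length i := by
    by_contra hn
    rw [← PySem.List.pyGet?_eq_none_iff cs i] at hn
    rw [h] at hn; cases hn
  obtain ⟨-, hlt⟩ := hin
  omega

def sum_unique_digits (s : String) (used : Option (List String)) (i : Int) : Int :=
  pvRecA s.toList (match used with | none => PySem.Set.empty | some l => l) i

-- ===== PORT B =====
def sum_unique_digits_alt (s : String) (used : Option (List String)) (i : Int) : Int :=
  let used0 : PySem.Set String := match used with | none => PySem.Set.empty | some l => l
  let final :=
    (PySem.List.pyRange i (PySem.Str.len s) 1).foldl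
      (fun acc j =>
        match PySem.List.pyGet? s.toList j with
        | none => acc  -- s[j] raises IndexError here; excluded by Pre_
        | some c => if PySem.Chars.isdigit c then PySem.Set.add acc (String.singleton c) else acc)
      used0
  (final.map (fun x => (PySem.Int.ofStr? x).getD 0)).sum

-- ===== PRECONDITION & SPEC =====
-- Pre_ = exactly where A returns: the start index is a valid (possibly negative) Python index
-- or equals len(s), and every string already in `used` parses as a Python int.
def Pre_sum_unique_digits (s : String) (used : Option (List String)) (i : Int) : Prop :=
  (-(PySem.Str.len s) ≤ i ∧ i ≤ PySem.Str.len s) ∧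
  (∀ x ∈ used.getD [], (PySem.Int.ofStr? x).isSome = true)
instance (s : String) (used : Option (List String)) (i : Int) : Decidable (Pre_sum_unique_digits s used i) := by unfold Pre_sum_unique_digits; infer_instance

def pvWitness_sum_unique_digits : String × Option (List String) × Int := ("a1b21", some ["7"], -3)

def Spec_sum_unique_digits (s : String) (used : Option (List String)) (i : Int) (out : Int) : Prop := out = sum_unique_digits_alt s used i
instance (s : String) (used : Option (List String)) (i : Int) (out : Int) : Decidable (Spec_sum_unique_digits s used i out) := by unfold Spec_sum_unique_digits; infer_instance

-- ===== CLAIM (what is proved, stated in full; the proofs are below) =====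
def Claim_equal_sum_unique_digits : Prop := ∀ (s : String) (used : Option (List String)) (i : Int), Dom_sum_unique_digits s used i → Pre_sum_unique_digits s used i → Spec_sum_unique_digits s used i (sum_unique_digits s used i)

-- ===== LEMMAS AND PROOFS =====
theorem pvSumIntsA_eq_map_sum (l : List String) :
    pvSumIntsA l = (l.map (fun x => (PySem.Int.ofStr? x).getD 0)).sum := by
  induction l with
  | nil => simp [pvSumIntsA]
  | cons x xs ih => simp [pvSumIntsA, ih]

theorem pvRecA_eq_foldl (cs : List Char) (used : PySem.Set String) (i : Int)
    (hlo : -(cs.length : Int) ≤ i) (hhi : i ≤ (cs.length : Int)) :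
    pvRecA cs used i =
      pvSumIntsA ((PySem.List.pyRange i (cs.length : Int) 1).foldl
        (fun acc j =>
          match PySem.List.pyGet? cs j with
          | none => acc
          | some c => if PySem.Chars.isdigit c then PySem.Set.add acc (String.singleton c) else acc)
        used) := by
  by_cases h : i = (cs.length : Int)
  · subst h
    rw [pvRecA, PySem.List.pyRange_one_eq_nil (le_refl _)]
    simp
  · have hlt : i < (cs.length : Int) := lt_of_le_of_ne hhi h
    have hsome : ∃ c, PySem.List.pyGet? cs i = some c := by
      cases hx : PySem.List.pyGet? cs i with
      | none =>
        exact absurd ((PySem.List.pyGet?_eq_none_iff cs i).mp hx)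
          (by simp only [PySem.Raise.InRange, not_and, not_lt]; omega)
      | some c => exact ⟨c, rfl⟩
    rcases hsome with ⟨c, hc⟩
    rw [pvRecA, if_neg h]
    rw [PySem.List.pyRange_one_cons hlt, List.foldl_cons]
    simp only [hc]
    split
    · next h' => rw [hc] at h'; cases h'
    · next c' h' =>
      have hcc : c' = c := by rw [hc] at h'; exact (Option.some.inj h').symm
      subst hcc
      exact pvRecA_eq_foldl cs _ (i + 1) (by omega) (by omega)
termination_by ((cs.length : Int) - i).toNat
decreasing_by omega

theorem sum_unique_digits_spec : Claim_equal_sum_unique_digits := by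
  intro s used i _ hpre
  unfold Spec_sum_unique_digits sum_unique_digits sum_unique_digits_alt
  obtain ⟨⟨hlo, hhi⟩, -⟩ := hpre
  rw [pvRecA_eq_foldl _ _ _ (by simpa [PySem.Str.len_eq] using hlo) (by simpa [PySem.Str.len_eq] using hhi)]
  simp [pvSumIntsA_eq_map_sum, PySem.Str.len_eq]
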